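-- pv_equiv track=rewrite | github.com/Epsilond1/codeforces | chat.py | pretest
-- ===== SOURCE A (Python) =====
-- def pretest(word):
--     alphabet = ['h', 'e', 'l', 'l', 'o']
--     position = []
--     i = 0
--     j = 0
--     answer = ''
--     while i < len(alphabet):
--         letter = alphabet[i]
--         while j < len(word):
--             if word[j] == letter and (not j in position):
--                 answer += letter
--                 position.append(j)
--                 break
--             j += 1
--         i += 1
--     return answer
-- ===== SOURCE B (Python) =====
-- def pretest(word):
--     target = "hello"
--     k = 0
--     for ch in word:
--         if k < len(target) and ch == target[k]:
--             k += 1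
--     return target[:k]
-- ===== Notes on version B (the rewrite author's own statement) =====
-- stated objective: simpler
-- what changed: Single pass driven by word with a match-counter k and return target[:k], replacing the pattern-driven nested while loops and the position list entirely.
import Mathlib
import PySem

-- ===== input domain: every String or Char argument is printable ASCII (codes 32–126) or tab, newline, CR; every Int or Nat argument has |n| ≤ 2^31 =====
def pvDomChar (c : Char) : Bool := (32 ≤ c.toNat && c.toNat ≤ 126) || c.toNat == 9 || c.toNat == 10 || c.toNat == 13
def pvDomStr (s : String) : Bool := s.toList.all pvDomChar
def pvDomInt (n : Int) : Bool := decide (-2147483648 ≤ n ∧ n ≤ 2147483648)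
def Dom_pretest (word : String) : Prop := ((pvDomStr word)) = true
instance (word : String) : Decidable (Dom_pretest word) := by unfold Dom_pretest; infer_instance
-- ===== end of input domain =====

-- B replaces A's pattern-driven nested while loops (with a `position` list) by a single
-- pass over `word` with a match counter k, returning target[:k]; objective: simpler.

-- ===== PORT A =====
-- inner `while j < len(word): …` loop of A, literal: scans indices from j upward,
-- skipping already-used positions; some j = break at match, none = loop exhausted
def pvInnerA (cs : List Char) (letter : Char) (j : Nat) (position : List Nat) : Option Nat :=
  if h : j < cs.length then
    if cs[j] = letter ∧ j ∉ position then some j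
    else pvInnerA cs letter (j + 1) position
  else none
termination_by cs.length - j

def pretest (word : String) : String :=
  let alphabet : List Char := ['h', 'e', 'l', 'l', 'o']
  let cs := word.toList
  let st := alphabet.foldl
    (fun (st : List Nat × Nat × String) letter =>
      let (position, j, answer) := st
      match pvInnerA cs letter j position with
      | some j' => (position ++ [j'], j', answer.push letter)   -- break: j stays at the match
      | none => (position, cs.length, answer))                  -- inner loop exhausted
    ([], 0, "")
  st.2.2

-- ===== PORT B =====
def pretest_alt (word : String) : String :=
  let target := "hello".toList
  let k := word.toList.foldl
    (fun k ch => if k < target.length ∧ ch = target.getD k ' ' then k + 1 else k) 0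
  String.ofList (target.take k)   -- target[:k]  (k ≤ 5, so plain take is exact)

-- ===== PRECONDITION & SPEC =====
def Spec_pretest (word : String) (out : String) : Prop := out = pretest_alt word
instance (word : String) (out : String) : Decidable (Spec_pretest word out) := by unfold Spec_pretest; infer_instance

-- ===== CLAIM (what is proved, stated in full; the proofs are below) =====
def Claim_equal_pretest : Prop := ∀ (word : String), Dom_pretest word → Spec_pretest word (pretest word)

-- ===== LEMMAS AND PROOFS =====

-- first index ≥ j holding `letter` (A's inner loop, without the position bookkeeping)
def pvFind (cs : List Char) (letter : Char) (j : Nat) : Option Nat :=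
  if h : j < cs.length then
    if cs[j] = letter then some j else pvFind cs letter (j + 1)
  else none
termination_by cs.length - j

-- index-based matcher: what A's outer loop computes from effective start s
def pvMIdx (cs : List Char) : List Char → Nat → List Char
  | [], _ => []
  | a :: p, s =>
    match pvFind cs a s with
    | some j' => a :: pvMIdx cs p (j' + 1)
    | none => []

-- list-based greedy matcher
def pvM : List Char → List Char → List Char
  | _, [] => []
  | [], _ :: _ => []
  | c :: w, a :: p => if c = a then a :: pvM w p else pvM w (a :: p)

-- greedy match count (B's k)
def pvG : List Char → List Char → Nat
  | _, [] => 0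
  | [], _ :: _ => 0
  | a :: p, c :: w => if c = a then pvG p w + 1 else pvG (a :: p) w

theorem pvInnerA_eq_find (cs : List Char) (letter : Char) (j : Nat) (position : List Nat)
    (h : ∀ x ∈ position, x < j) : pvInnerA cs letter j position = pvFind cs letter j := by
  unfold pvInnerA pvFind
  split
  · have hnm : j ∉ position := fun hj => lt_irrefl j (h j hj)
    by_cases hc : cs[j] = letter
    · simp [hc, hnm]
    · simp only [hc, false_and, if_false]
      exact pvInnerA_eq_find cs letter (j + 1) position (fun x hx => Nat.lt_succ_of_lt (h x hx))
  · rfl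
termination_by cs.length - j

theorem pvInnerA_mem (cs : List Char) (letter : Char) (j : Nat) (position : List Nat)
    (hj : j ∈ position) (h : ∀ x ∈ position, x ≤ j) :
    pvInnerA cs letter j position = pvFind cs letter (j + 1) := by
  unfold pvInnerA
  split
  · simp only [hj, not_true_eq_false, and_false, if_false]
    exact pvInnerA_eq_find cs letter (j + 1) position (fun x hx => Nat.lt_succ_of_le (h x hx))
  · rename_i hge
    unfold pvFind
    have : ¬ j + 1 < cs.length := by omega
    simp [this]

theorem pvFind_some (cs : List Char) (letter : Char) (j j' : Nat)
    (h : pvFind cs letter j = some j') : j ≤ j' ∧ j' < cs.length := by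
  unfold pvFind at h
  split at h
  · split at h
    · cases h; omega
    · have := pvFind_some cs letter (j + 1) j' h
      omega
  · cases h
termination_by cs.length - j

theorem pvFind_none_of_ge (cs : List Char) (letter : Char) (j : Nat) (h : cs.length ≤ j) :
    pvFind cs letter j = none := by
  unfold pvFind
  have : ¬ j < cs.length := by omega
  simp [this]

theorem pvMIdx_end (cs : List Char) (p : List Char) : pvMIdx cs p cs.length = [] := by
  cases p with
  | nil => rfl
  | cons a p => simp [pvMIdx, pvFind_none_of_ge cs a cs.length (le_refl _)]

-- A's outer fold appends `pvMIdx cs p s` to the answer, from any invariant-respecting state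
theorem pretest_fold (cs : List Char) (p : List Char) (position : List Nat) (j : Nat)
    (answer : String)
    (hpos : ∀ x ∈ position, x ≤ j ∧ x < cs.length) (hj : j ≤ cs.length) :
    (p.foldl
      (fun (st : List Nat × Nat × String) letter =>
        let (position, j, answer) := st
        match pvInnerA cs letter j position with
        | some j' => (position ++ [j'], j', answer.push letter)
        | none => (position, cs.length, answer))
      (position, j, answer)).2.2.toList
    = answer.toList ++ pvMIdx cs p (if j ∈ position then j + 1 else j) := by
  induction p generalizing position j answer with
  | nil => simp [pvMIdx]
  | cons a p ih =>
    have hfind : pvInnerA cs a j position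
        = pvFind cs a (if j ∈ position then j + 1 else j) := by
      by_cases hm : j ∈ position
      · simp only [hm, if_true]
        exact pvInnerA_mem cs a j position hm (fun x hx => (hpos x hx).1)
      · simp only [hm, if_false]
        exact pvInnerA_eq_find cs a j position
          (fun x hx => lt_of_le_of_ne ((hpos x hx).1) (fun he => hm (he ▸ hx)))
    simp only [List.foldl_cons, hfind]
    cases hf : pvFind cs a (if j ∈ position then j + 1 else j) with
    | some j' =>
      have hb := pvFind_some cs a _ j' hf
      have hpos' : ∀ x ∈ position ++ [j'], x ≤ j' ∧ x < cs.length := by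
        intro x hx
        rcases List.mem_append.mp hx with hx | hx
        · have := hpos x hx
          constructor
          · by_cases hm : j ∈ position <;> simp [hm] at hb <;> omega
          · exact this.2
        · simp at hx; omega
      have hrec := ih (position ++ [j']) j' (answer.push a) hpos' (by omega)
      have hj' : j' ∈ position ++ [j'] := by simp
      simp only [hj', if_true] at hrec
      simp [hrec, pvMIdx, hf]
    | none =>
      have hlen : cs.length ∉ position := fun hm => lt_irrefl _ (hpos _ hm).2
      have hrec := ih position cs.length answer
        (fun x hx => ⟨le_of_lt (hpos x hx).2, (hpos x hx).2⟩) (le_refl _)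
      simp only [hlen, if_false] at hrec
      simp [hrec, pvMIdx, hf, pvMIdx_end]

-- pvMIdx from start s = pvM on the dropped word
theorem pvMIdx_eq_pvM (cs : List Char) (p : List Char) (s : Nat) :
    pvMIdx cs p s = pvM (cs.drop s) p := by
  cases p with
  | nil => cases cs.drop s <;> rfl
  | cons a p =>
    by_cases h : s < cs.length
    · have hdrop : cs.drop s = cs[s] :: cs.drop (s + 1) := List.drop_eq_getElem_cons h
      by_cases hc : cs[s] = a
      · have hf : pvFind cs a s = some s := by unfold pvFind; simp [h, hc]
        rw [hdrop]
        simp [pvMIdx, hf, pvM, hc, pvMIdx_eq_pvM cs p (s + 1)]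
      · have hf : pvFind cs a s = pvFind cs a (s + 1) := by
          conv_lhs => rw [pvFind]
          simp [h, hc]
        have heq : pvMIdx cs (a :: p) s = pvMIdx cs (a :: p) (s + 1) := by
          simp only [pvMIdx, hf]
        rw [heq, hdrop, pvMIdx_eq_pvM cs (a :: p) (s + 1)]
        simp [pvM, hc]
    · rw [List.drop_eq_nil_of_le (by omega), pvMIdx]
      simp [pvFind_none_of_ge cs a s (by omega), pvM]
termination_by (cs.length - s, p.length)

-- pvM is a take of the pattern
theorem pvM_eq_take (w p : List Char) : pvM w p = p.take (pvG p w) := by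
  induction w generalizing p with
  | nil => cases p <;> rfl
  | cons c w ih =>
    cases p with
    | nil => rfl
    | cons a p =>
      by_cases hc : c = a
      · simp [pvM, pvG, hc, ih p]
      · simp [pvM, pvG, hc, ih (a :: p)]

-- B's fold computes the greedy count
theorem pretest_alt_fold (t : List Char) (w : List Char) (k : Nat) :
    w.foldl (fun k ch => if k < t.length ∧ ch = t.getD k ' ' then k + 1 else k) k
    = k + pvG (t.drop k) w := by
  induction w generalizing k with
  | nil => cases t.drop k <;> simp [pvG]
  | cons c w ih =>
    by_cases hk : k < t.length
    · have hdrop : t.drop k = t[k] :: t.drop (k + 1) := List.drop_eq_getElem_cons hk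
      have hget : t.getD k ' ' = t[k] := List.getD_eq_getElem t ' ' hk
      by_cases hc : c = t[k]
      · simp only [List.foldl_cons, hget, hk, hc, and_self, if_true, ih (k + 1), hdrop]
        simp [pvG, hc]
        omega
      · simp only [List.foldl_cons, hget, hk, hc, and_false, if_false, ih k, hdrop]
        simp [pvG, hc]
    · have hdrop : t.drop k = [] := List.drop_eq_nil_of_le (by omega)
      simp only [List.foldl_cons, hk, false_and, if_false, ih k, hdrop]
      cases w <;> simp [pvG]

-- ===== VERDICT (by name: the statement is the Claim_ definition above) =====
theorem pretest_spec : Claim_equal_pretest := by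
  intro word _
  show pretest word = pretest_alt word
  apply String.toList_injective
  unfold pretest pretest_alt
  have hA := pretest_fold word.toList ['h', 'e', 'l', 'l', 'o'] [] 0 ""
    (by simp) (Nat.zero_le _)
  simp only [List.not_mem_nil, if_false] at hA
  simp only [hA]
  rw [pvMIdx_eq_pvM, List.drop_zero, pvM_eq_take,
    pretest_alt_fold "hello".toList word.toList 0]
  simp
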